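-- pv_equiv track=rewrite | github.com/e-vergo/TDCSG | scripts/find_true_cyclic_n10.py | generate_words
-- ===== SOURCE A (Python) =====
-- def generate_words(n, max_depth):
--     """Generate alternating words up to max_depth."""
--     words = []
--     max_power = n // 2
--
--     def extend(word, depth):
--         if depth == 0:
--             return
--         last_gen = word[-1][0] if word else None
--         next_gens = ['b'] if last_gen == 'a' else (['a'] if last_gen == 'b' else ['a', 'b'])
--         for gen in next_gens:
--             for power in range(-max_power, max_power + 1):
--                 if power == 0:
--                     continue
--                 new_word = word + [(gen, power)]
--                 words.append(new_word)
--                 extend(new_word, depth - 1)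
--
--     for start_gen in ['a', 'b']:
--         for start_power in range(-max_power, max_power + 1):
--             if start_power == 0:
--                 continue
--             word = [(start_gen, start_power)]
--             words.append(word)
--             extend(word, max_depth - 1)
--     return words
-- ===== SOURCE B (Python) =====
-- def generate_words(n, max_depth):
--     """Generate alternating words up to max_depth (bottom-up, by suffix tables)."""
--     max_power = n // 2
--     letters = [p for p in range(-max_power, max_power + 1) if p != 0]
--     if not letters:
--         return []
--
--     def block(gen, sub):
--         # all words starting with (gen, p): the single letter, then every suffix of sub behind it
--         table = []
--         for p in letters:
--             table.append([(gen, p)])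
--             for s in sub:
--                 table.append([(gen, p)] + s)
--         return table
--
--     suff_a, suff_b = [], []      # suffix words allowed after an 'a' / a 'b'
--     for _ in range(max_depth - 1):
--         suff_a, suff_b = block('b', suff_b), block('a', suff_a)
--     return block('a', suff_a) + block('b', suff_b)
-- ===== Notes on version B (the rewrite author's own statement) =====
-- stated objective: alternative
-- what changed: Replaces A's top-down recursion that extends every growing word with a bottom-up dynamic-programming iteration over depth that builds two suffix tables (words allowed after an 'a' / after a 'b') and finally prefixes each start letter.
import Mathlib
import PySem

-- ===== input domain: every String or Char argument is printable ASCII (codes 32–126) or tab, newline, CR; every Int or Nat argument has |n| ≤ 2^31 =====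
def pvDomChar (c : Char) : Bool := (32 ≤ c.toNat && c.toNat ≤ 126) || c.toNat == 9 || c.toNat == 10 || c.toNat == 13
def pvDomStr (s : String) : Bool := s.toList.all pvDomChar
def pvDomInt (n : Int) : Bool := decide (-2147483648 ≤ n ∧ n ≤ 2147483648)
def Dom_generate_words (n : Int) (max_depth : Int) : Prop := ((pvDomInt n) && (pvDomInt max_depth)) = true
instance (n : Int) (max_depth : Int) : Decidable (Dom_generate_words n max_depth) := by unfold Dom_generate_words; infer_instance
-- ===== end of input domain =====

-- B replaces A's top-down recursion over growing words by a bottom-up iteration that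
-- builds suffix tables per last generator (dynamic-programming decomposition); return
-- values agree wherever A returns (A raises RecursionError when max_depth ≤ 0 and n ≥ 2).

-- ===== PORT A =====
-- next_gens computation of A's inner `extend`
def pyNextGens (word : List (String × Int)) : List String :=
  let last_gen : Option String :=
    if word.isEmpty then none else (PySem.List.pyGet? word (-1)).map Prod.fst
  if last_gen == some "a" then ["b"]
  else if last_gen == some "b" then ["a"]
  else ["a", "b"]

-- A's recursive `extend`; the list returned is the segment it appends to `words`.
-- Python recurses on `depth` with base `depth == 0`; for depth < 0 Python never
-- terminates (excluded by Pre_), here the fuel is (depth).toNat.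
def extendA (mp : Int) : List (String × Int) → Nat → List (List (String × Int))
  | _, 0 => []
  | word, fuel + 1 =>
    (pyNextGens word).foldl (fun acc gen =>
      (PySem.List.pyRange (-mp) (mp + 1) 1).foldl (fun acc2 power =>
        if power == 0 then acc2
        else acc2 ++ ((word ++ [(gen, power)]) :: extendA mp (word ++ [(gen, power)]) fuel)) acc) []

def generate_words (n : Int) (max_depth : Int) : List (List (String × Int)) :=
  let mp := PySem.Int.floordiv n 2
  ["a", "b"].foldl (fun acc start_gen =>
    (PySem.List.pyRange (-mp) (mp + 1) 1).foldl (fun acc2 start_power =>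
      if start_power == 0 then acc2
      else acc2 ++ ([(start_gen, start_power)] ::
             extendA mp [(start_gen, start_power)] (max_depth - 1).toNat)) acc) []

-- ===== PORT B =====
-- B's `block`: all words starting with (gen, p), then each suffix of sub behind it
def altBlock (gen : String) (letters : List Int) (sub : List (List (String × Int))) :
    List (List (String × Int)) :=
  letters.foldl (fun table p =>
    sub.foldl (fun t s => t ++ [[(gen, p)] ++ s]) (table ++ [[(gen, p)]])) []

-- B's main loop: k iterations of `suff_a, suff_b = block('b', suff_b), block('a', suff_a)`
def altIter (letters : List Int) : Nat →
    List (List (String × Int)) × List (List (String × Int))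
  | 0 => ([], [])
  | k + 1 =>
    let s := altIter letters k
    (altBlock "b" letters s.2, altBlock "a" letters s.1)

def generate_words_alt (n : Int) (max_depth : Int) : List (List (String × Int)) :=
  let max_power := PySem.Int.floordiv n 2
  let letters := (PySem.List.pyRange (-max_power) (max_power + 1) 1).filter (fun p => !(p == 0))
  if letters.isEmpty then []
  else
    let s := altIter letters (max_depth - 1).toNat
    altBlock "a" letters s.1 ++ altBlock "b" letters s.2

-- ===== PRECONDITION & SPEC =====
-- Pre_ excludes exactly the inputs (max_depth ≤ 0 with n ≥ 2) on which A's `extend`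
-- recurses past its depth == 0 base case forever and raises RecursionError.
def Pre_generate_words (n : Int) (max_depth : Int) : Prop := 1 ≤ max_depth ∨ n ≤ 1
instance (n : Int) (max_depth : Int) : Decidable (Pre_generate_words n max_depth) := by
  unfold Pre_generate_words; infer_instance
def pvWitness_generate_words : Int × Int := (5, 3)

def Spec_generate_words (n : Int) (max_depth : Int) (out : List (List (String × Int))) : Prop :=
  out = generate_words_alt n max_depth
instance (n : Int) (max_depth : Int) (out : List (List (String × Int))) :
    Decidable (Spec_generate_words n max_depth out) := by unfold Spec_generate_words; infer_instance

-- ===== CLAIM (what is proved, stated in full; the proofs are below) =====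
def Claim_equal_generate_words : Prop := ∀ (n : Int) (max_depth : Int),
  Dom_generate_words n max_depth → Pre_generate_words n max_depth →
  Spec_generate_words n max_depth (generate_words n max_depth)

-- ===== LEMMAS AND PROOFS =====

-- the nonzero powers, the shared letter alphabet of both sides
def lettersOf (mp : Int) : List Int :=
  (PySem.List.pyRange (-mp) (mp + 1) 1).filter (fun p => !(p == 0))

lemma flatMap_ite_nil (l : List Int) (g : Int → List (List (String × Int))) :
    l.flatMap (fun p => if p == 0 then [] else g p)
      = (l.filter (fun p => !(p == 0))).flatMap g := by
  induction l with
  | nil => rfl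
  | cons x xs ih =>
    simp only [List.flatMap_cons, List.filter_cons]
    by_cases hx : x = 0
    · simp only [hx]
      simpa using ih
    · simp only [if_neg (by simpa using hx : ¬((x == 0) = true))]
      simp only [show (!(x == 0)) = true from by simpa using hx, if_pos]
      rw [List.flatMap_cons, ih]

lemma foldl_skip_append (l : List Int) (g : Int → List (List (String × Int)))
    (acc : List (List (String × Int))) :
    l.foldl (fun acc2 p => if p == 0 then acc2 else acc2 ++ g p) acc
      = acc ++ (l.filter (fun p => !(p == 0))).flatMap g := by
  rw [← flatMap_ite_nil l g, ← PySem.List.foldl_append_eq_flatMap]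
  apply PySem.List.foldl_congr_mem
  intro a x _
  by_cases hx : x = 0 <;> simp [hx]

lemma pyNextGens_snoc_a (w : List (String × Int)) (q : Int) :
    pyNextGens (w ++ [("a", q)]) = ["b"] := by
  simp [pyNextGens, PySem.List.pyGet?, PySem.List.pyIdx?]

lemma pyNextGens_snoc_b (w : List (String × Int)) (q : Int) :
    pyNextGens (w ++ [("b", q)]) = ["a"] := by
  simp [pyNextGens, PySem.List.pyGet?, PySem.List.pyIdx?]

lemma extendA_succ (mp : Int) (word : List (String × Int)) (f : Nat) :
    extendA mp word (f + 1)
      = (pyNextGens word).flatMap (fun gen => (lettersOf mp).flatMap (fun p =>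
          (word ++ [(gen, p)]) :: extendA mp (word ++ [(gen, p)]) f)) := by
  rw [extendA]
  rw [show (fun (acc : List (List (String × Int))) gen =>
        (PySem.List.pyRange (-mp) (mp + 1) 1).foldl (fun acc2 power =>
          if power == 0 then acc2
          else acc2 ++ ((word ++ [(gen, power)]) :: extendA mp (word ++ [(gen, power)]) f)) acc)
      = fun acc gen => acc ++ (lettersOf mp).flatMap (fun p =>
          (word ++ [(gen, p)]) :: extendA mp (word ++ [(gen, p)]) f) from
    funext fun acc => funext fun gen => foldl_skip_append _ _ _]
  rw [PySem.List.foldl_append_eq_flatMap, List.nil_append]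

lemma altBlock_eq (gen : String) (letters : List Int) (sub : List (List (String × Int))) :
    altBlock gen letters sub
      = letters.flatMap (fun p => [(gen, p)] :: sub.map (fun s => [(gen, p)] ++ s)) := by
  unfold altBlock
  rw [show (fun (table : List (List (String × Int))) p =>
        sub.foldl (fun t s => t ++ [[(gen, p)] ++ s]) (table ++ [[(gen, p)]]))
      = fun table p => table ++ ([(gen, p)] :: sub.map (fun s => [(gen, p)] ++ s)) from
    funext fun table => funext fun p => by
      rw [PySem.List.foldl_append_singleton_eq_map]; simp]
  rw [PySem.List.foldl_append_eq_flatMap, List.nil_append]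

-- the main invariant: A's `extend` on a word ending in "a"/"b" yields B's suffix table,
-- each suffix prefixed with that word
lemma ext_char (mp : Int) (f : Nat) :
    (∀ w q, extendA mp (w ++ [("a", q)]) f
       = ((altIter (lettersOf mp) f).1).map (fun s => (w ++ [("a", q)]) ++ s))
  ∧ (∀ w q, extendA mp (w ++ [("b", q)]) f
       = ((altIter (lettersOf mp) f).2).map (fun s => (w ++ [("b", q)]) ++ s)) := by
  induction f with
  | zero => simp [extendA, altIter]
  | succ f ih =>
    obtain ⟨iha, ihb⟩ := ih
    constructor
    · intro w q
      rw [extendA_succ, pyNextGens_snoc_a]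
      simp only [List.flatMap_cons, List.flatMap_nil, List.append_nil]
      simp only [show ∀ (p : Int), extendA mp ((w ++ [("a", q)]) ++ [("b", p)]) f
          = ((altIter (lettersOf mp) f).2).map
              (fun s => ((w ++ [("a", q)]) ++ [("b", p)]) ++ s) from fun p => ihb _ p]
      simp only [altIter, altBlock_eq]
      simp [List.map_flatMap, List.map_map, Function.comp_def, List.append_assoc]
    · intro w q
      rw [extendA_succ, pyNextGens_snoc_b]
      simp only [List.flatMap_cons, List.flatMap_nil, List.append_nil]
      simp only [show ∀ (p : Int), extendA mp ((w ++ [("b", q)]) ++ [("a", p)]) f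
          = ((altIter (lettersOf mp) f).1).map
              (fun s => ((w ++ [("b", q)]) ++ [("a", p)]) ++ s) from fun p => iha _ p]
      simp only [altIter, altBlock_eq]
      simp [List.map_flatMap, List.map_map, Function.comp_def, List.append_assoc]

-- the whole programs, with the shared quantities abstracted
lemma gen_eq (mp : Int) (fuel : Nat) :
    (["a", "b"].foldl (fun acc g =>
      (PySem.List.pyRange (-mp) (mp + 1) 1).foldl (fun acc2 sp =>
        if sp == 0 then acc2
        else acc2 ++ ([(g, sp)] :: extendA mp [(g, sp)] fuel)) acc) [])
    = altBlock "a" (lettersOf mp) (altIter (lettersOf mp) fuel).1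
      ++ altBlock "b" (lettersOf mp) (altIter (lettersOf mp) fuel).2 := by
  obtain ⟨iha, ihb⟩ := ext_char mp fuel
  rw [show (fun (acc : List (List (String × Int))) (g : String) =>
        (PySem.List.pyRange (-mp) (mp + 1) 1).foldl (fun acc2 sp =>
          if sp == 0 then acc2
          else acc2 ++ ([(g, sp)] :: extendA mp [(g, sp)] fuel)) acc)
      = fun acc g => acc ++ (lettersOf mp).flatMap
          (fun p => [(g, p)] :: extendA mp [(g, p)] fuel) from
    funext fun acc => funext fun g => foldl_skip_append _ _ _]
  rw [PySem.List.foldl_append_eq_flatMap, List.nil_append]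
  simp only [List.flatMap_cons, List.flatMap_nil, List.append_nil]
  rw [altBlock_eq, altBlock_eq]
  have ha : ∀ q, extendA mp [("a", q)] fuel
      = ((altIter (lettersOf mp) fuel).1).map (fun s => [("a", q)] ++ s) :=
    fun q => by simpa using iha [] q
  have hb : ∀ q, extendA mp [("b", q)] fuel
      = ((altIter (lettersOf mp) fuel).2).map (fun s => [("b", q)] ++ s) :=
    fun q => by simpa using ihb [] q
  simp only [ha, hb]

-- the same, with B's empty-alphabet early return folded in
lemma gen_eq' (mp : Int) (fuel : Nat) :
    (["a", "b"].foldl (fun acc g =>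
      (PySem.List.pyRange (-mp) (mp + 1) 1).foldl (fun acc2 sp =>
        if sp == 0 then acc2
        else acc2 ++ ([(g, sp)] :: extendA mp [(g, sp)] fuel)) acc) [])
    = if (lettersOf mp).isEmpty then []
      else altBlock "a" (lettersOf mp) (altIter (lettersOf mp) fuel).1
           ++ altBlock "b" (lettersOf mp) (altIter (lettersOf mp) fuel).2 := by
  by_cases h : (lettersOf mp).isEmpty
  · rw [if_pos h, gen_eq]
    rw [List.isEmpty_iff] at h
    rw [h]
    rfl
  · rw [if_neg h, gen_eq]

-- ===== VERDICT (by name: the statement is the Claim_ definition above) =====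
theorem generate_words_spec : Claim_equal_generate_words := by
  intro n md _ _
  exact gen_eq' (PySem.Int.floordiv n 2) (md - 1).toNat
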